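-- pv_equiv track=rewrite | github.com/leo-salcedo/TIP102 | Unit 2/Session 2/Standard Problem Set 1/problem3.py | navigate_research_station
-- ===== SOURCE A (Python) =====
-- def navigate_research_station(station_layout, observations):
--   dictionary = {}
--   for index, char in enumerate(station_layout):
--     dictionary[char] = index
--   curr_index = 0
--   result = 0
--   for char in observations:
--     difference = abs(curr_index - dictionary[char])
--     result += difference
--     curr_index = dictionary[char]
--   return result
-- ===== SOURCE B (Python) =====
-- def navigate_research_station(station_layout, observations):
--     dictionary = {}
--     for index, char in enumerate(station_layout):
--         dictionary[char] = index
--     # Boundary-crossing count: each move lo->hi contributes 1 to every unit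
--     # boundary j in [lo, hi); record moves as +1/-1 in a difference array and
--     # read the answer off as the sum of its prefix sums (total coverage).
--     delta = [0] * (len(station_layout) + 1)
--     pos = 0
--     for char in observations:
--         nxt = dictionary[char]
--         lo, hi = (pos, nxt) if pos <= nxt else (nxt, pos)
--         delta[lo] += 1
--         delta[hi] -= 1
--         pos = nxt
--     coverage = 0
--     total = 0
--     for x in delta:
--         coverage += x
--         total += coverage
--     return total
-- ===== Notes on version B (the rewrite author's own statement) =====
-- stated objective: alternative
-- what changed: B replaces A's running-position accumulation of |curr - next| by a boundary-crossing count: each move is recorded as a +1/-1 range mark in a difference array over the layout, and the answer is read off as the sum of the array's prefix sums.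
import Mathlib
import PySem

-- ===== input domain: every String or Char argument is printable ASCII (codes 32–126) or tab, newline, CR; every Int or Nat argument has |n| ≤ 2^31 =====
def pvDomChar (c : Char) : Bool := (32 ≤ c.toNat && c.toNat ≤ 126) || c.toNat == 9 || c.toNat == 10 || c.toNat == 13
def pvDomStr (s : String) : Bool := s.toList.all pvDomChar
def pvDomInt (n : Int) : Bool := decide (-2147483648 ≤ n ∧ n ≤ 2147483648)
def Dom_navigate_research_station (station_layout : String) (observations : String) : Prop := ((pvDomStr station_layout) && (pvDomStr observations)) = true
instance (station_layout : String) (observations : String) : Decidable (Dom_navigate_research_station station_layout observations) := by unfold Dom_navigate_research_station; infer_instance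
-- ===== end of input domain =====

-- B counts boundary crossings instead of accumulating |curr - next|: each move marks +1/-1
-- in a difference array over the layout and the answer is the sum of its prefix sums (alternative algorithm).

-- ===== PORT A =====
-- dict lookup dictionary[char]: under Pre_ every observed char is a key, so getD's default is never used
def navigate_research_station (station_layout : String) (observations : String) : Int :=
  let dictionary : PySem.Dict Char Int :=
    (PySem.List.enumerate station_layout.toList).foldl
      (fun d p => d.insert p.2 p.1) PySem.Dict.empty
  let s := observations.toList.foldl
    (fun (st : Int × Int) char =>
      let difference := |st.1 - dictionary.getD char 0|
      (dictionary.getD char 0, st.2 + difference)) (0, 0)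
  s.2

-- ===== PORT B =====
-- delta[lo] += 1 / delta[hi] -= 1: lo, hi are always in range (proved below), so List.set/getD are exact
def navigate_research_station_alt (station_layout : String) (observations : String) : Int :=
  let dictionary : PySem.Dict Char Int :=
    (PySem.List.enumerate station_layout.toList).foldl
      (fun d p => d.insert p.2 p.1) PySem.Dict.empty
  let fin := observations.toList.foldl
    (fun (st : List Int × Int) char =>
      let nxt := dictionary.getD char 0
      let lo := min st.2 nxt
      let hi := max st.2 nxt
      let d1 := st.1.set lo.toNat (st.1.getD lo.toNat 0 + 1)
      let d2 := d1.set hi.toNat (d1.getD hi.toNat 0 - 1)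
      (d2, nxt))
    (List.replicate (station_layout.toList.length + 1) 0, 0)
  (fin.1.foldl (fun (st : Int × Int) x => (st.1 + x, st.2 + (st.1 + x))) (0, 0)).2

-- ===== PRECONDITION & SPEC =====
-- Pre_ excludes observations containing a char absent from station_layout: Python A (and B) raise KeyError there.
def Pre_navigate_research_station (station_layout : String) (observations : String) : Prop :=
  (observations.toList.all (fun c => station_layout.toList.contains c)) = true
instance (station_layout : String) (observations : String) : Decidable (Pre_navigate_research_station station_layout observations) := by unfold Pre_navigate_research_station; infer_instance

def pvWitness_navigate_research_station : String × String := ("abc", "cabba")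

def Spec_navigate_research_station (station_layout : String) (observations : String) (out : Int) : Prop := out = navigate_research_station_alt station_layout observations
instance (station_layout : String) (observations : String) (out : Int) : Decidable (Spec_navigate_research_station station_layout observations out) := by unfold Spec_navigate_research_station; infer_instance

-- ===== CLAIM (what is proved, stated in full; the proofs are below) =====
def Claim_equal_navigate_research_station : Prop := ∀ (station_layout : String) (observations : String), Dom_navigate_research_station station_layout observations → Pre_navigate_research_station station_layout observations → Spec_navigate_research_station station_layout observations (navigate_research_station station_layout observations)

-- ===== LEMMAS AND PROOFS =====

-- weighted sum Σ_k l_k * (len - k): the value of B's prefix-sum pass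
def pvSw : List Int → Int
  | [] => 0
  | x :: t => x * ((t.length : Int) + 1) + pvSw t

-- the total jump distance from position pos through lookups f
def pvJumps (f : Char → Int) : Int → List Char → Int
  | _, [] => 0
  | pos, c :: t => |pos - f c| + pvJumps f (f c) t

theorem pv_fold2 (l : List Int) (c t : Int) :
    l.foldl (fun (st : Int × Int) x => (st.1 + x, st.2 + (st.1 + x))) (c, t)
      = (c + l.sum, t + (l.length : Int) * c + pvSw l) := by
  induction l generalizing c t with
  | nil => simp [pvSw]
  | cons x xs ih =>
      simp only [List.foldl_cons, ih, pvSw, List.sum_cons, List.length_cons]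
      simp only [Prod.mk.injEq]
      refine ⟨by ring, by push_cast; ring⟩

theorem pvSw_set (l : List Int) (i : Nat) (v : Int) (h : i < l.length) :
    pvSw (l.set i v) = pvSw l + (v - l.getD i 0) * ((l.length : Int) - (i : Int)) := by
  induction l generalizing i with
  | nil => simp at h
  | cons x t ih =>
      cases i with
      | zero => simp [pvSw]; ring
      | succ j =>
          simp only [List.set_cons_succ, pvSw, List.length_set, List.getD_cons_succ,
            List.length_cons]
          rw [ih j (by simpa using h)]
          push_cast
          ring

theorem pvSw_replicate (k : Nat) : pvSw (List.replicate k 0) = 0 := by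
  induction k with
  | zero => simp [pvSw]
  | succ n ih => simp [List.replicate_succ, pvSw, ih]

theorem pv_loopA (f : Char → Int) (l : List Char) (pos r : Int) :
    (l.foldl (fun (st : Int × Int) c => (f c, st.2 + |st.1 - f c|)) (pos, r)).2
      = r + pvJumps f pos l := by
  induction l generalizing pos r with
  | nil => simp [pvJumps]
  | cons c t ih => simp only [List.foldl_cons, ih, pvJumps]; ring

-- B's range-marking loop shifts pvSw by exactly the jump distance
theorem pv_loopB (f : Char → Int) (hf : ∀ c, 0 ≤ f c ∧ f c < (L : Int))
    (l : List Char) (delta : List Int) (pos : Int)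
    (hlen : delta.length = L) (hpos : 0 ≤ pos ∧ pos < (L : Int)) :
    pvSw ((l.foldl
      (fun (st : List Int × Int) char =>
        let nxt := f char
        let lo := min st.2 nxt
        let hi := max st.2 nxt
        let d1 := st.1.set lo.toNat (st.1.getD lo.toNat 0 + 1)
        let d2 := d1.set hi.toNat (d1.getD hi.toNat 0 - 1)
        (d2, nxt)) (delta, pos)).1)
      = pvSw delta + pvJumps f pos l := by
  induction l generalizing delta pos with
  | nil => simp [pvJumps]
  | cons c t ih =>
      simp only [List.foldl_cons]
      have hn := hf c
      have hlo0 : (0:Int) ≤ min pos (f c) := le_min hpos.1 hn.1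
      have hhi0 : (0:Int) ≤ max pos (f c) := le_trans hpos.1 (le_max_left _ _)
      have hloL : min pos (f c) < (L : Int) := lt_of_le_of_lt (min_le_left _ _) hpos.2
      have hhiL : max pos (f c) < (L : Int) := max_lt hpos.2 hn.2
      have hloN : (min pos (f c)).toNat < delta.length := by omega
      set d1 := delta.set (min pos (f c)).toNat
        (delta.getD (min pos (f c)).toNat 0 + 1) with hd1
      have hlen1 : d1.length = L := by simp [hd1, hlen]
      have hhiN : (max pos (f c)).toNat < d1.length := by omega
      rw [ih _ _ (by simp [hlen1]) ⟨hn.1, hn.2⟩]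
      rw [pvSw_set d1 _ _ hhiN, pvSw_set delta _ _ hloN]
      have h1 : ((min pos (f c)).toNat : Int) = min pos (f c) := Int.toNat_of_nonneg hlo0
      have h2 : ((max pos (f c)).toNat : Int) = max pos (f c) := Int.toNat_of_nonneg hhi0
      have habs : max pos (f c) - min pos (f c) = |pos - f c| := by
        rw [max_sub_min_eq_abs, abs_sub_comm]
      simp only [pvJumps, h1, h2, hlen, hlen1, ← habs]
      ring

-- values of the index dictionary are enumerate indices: 0 ≤ v < layout length (default 0 included)
theorem pv_dict_bounds (layout : List Char) (c : Char) :
    0 ≤ ((PySem.List.enumerate layout).foldl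
          (fun (d : PySem.Dict Char Int) p => d.insert p.2 p.1) PySem.Dict.empty).getD c 0
    ∧ ((PySem.List.enumerate layout).foldl
          (fun (d : PySem.Dict Char Int) p => d.insert p.2 p.1) PySem.Dict.empty).getD c 0
        ≤ (layout.length : Int) := by
  have main : ∀ (l : List (Int × Char)) (d : PySem.Dict Char Int),
      (∀ p ∈ l, 0 ≤ p.1 ∧ p.1 ≤ (layout.length : Int)) →
      (0 ≤ d.getD c 0 ∧ d.getD c 0 ≤ (layout.length : Int)) →
      0 ≤ (l.foldl (fun d p => d.insert p.2 p.1) d).getD c 0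
        ∧ (l.foldl (fun d p => d.insert p.2 p.1) d).getD c 0 ≤ (layout.length : Int) := by
    intro l
    induction l with
    | nil => intro d _ hd; simpa using hd
    | cons p t ih =>
        intro d hl hd
        simp only [List.foldl_cons]
        refine ih _ (fun q hq => hl q (List.mem_cons_of_mem _ hq)) ?_
        rw [PySem.Dict.getD_insert]
        split_ifs with h
        · exact hl p (List.mem_cons_self)
        · exact hd
  refine main _ _ ?_ (by simp)
  intro p hp
  rw [PySem.List.mem_enumerate_iff] at hp
  obtain ⟨k, hk, rfl⟩ := hp
  refine ⟨by simp, by simp; omega⟩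

-- ===== VERDICT (by name: the statement is the Claim_ definition above) =====
theorem navigate_research_station_spec : Claim_equal_navigate_research_station := by
  intro sl obs _ _
  unfold Spec_navigate_research_station navigate_research_station navigate_research_station_alt
  simp only []
  set f : Char → Int := fun c =>
    ((PySem.List.enumerate sl.toList).foldl
      (fun (d : PySem.Dict Char Int) p => d.insert p.2 p.1) PySem.Dict.empty).getD c 0 with hfdef
  have hfb : ∀ c, 0 ≤ f c ∧ f c ≤ (sl.toList.length : Int) := by
    intro c; simpa [hfdef] using pv_dict_bounds sl.toList c
  rw [pv_loopA f obs.toList 0 0, pv_fold2]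
  simp only []
  rw [pv_loopB (L := ((sl.toList.length : Int) + 1)) f
      (fun c => ⟨(hfb c).1, by have := (hfb c).2; omega⟩)
      obs.toList _ 0 (by simp) ⟨le_refl 0, by positivity⟩]
  rw [pvSw_replicate]
  simp
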